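-- pv_equiv track=rewrite | github.com/bamboo-pan/aistudio-api | .trellis/scripts/common/workflow_state.py | _is_non_code_path
-- ===== SOURCE A (Python) =====
-- from typing import Final
--
-- _NON_CODE_PREFIXES: Final[tuple[str, ...]] = (
--     ".trellis/tasks",
--     ".trellis/workspace",
--     ".trellis/.runtime",
-- )
--
-- def _normalize_rel_path(path: str) -> str:
--     normalized = path.replace("\\", "/")
--     while normalized.startswith("./"):
--         normalized = normalized[2:]
--     return normalized.strip("/")
--
-- def _is_non_code_path(path: str) -> bool:
--     normalized = _normalize_rel_path(path)
--     if normalized == ".git" or normalized.startswith(".git/"):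
--         return True
--     for prefix in _NON_CODE_PREFIXES:
--         if normalized == prefix or normalized.startswith(f"{prefix}/"):
--             return True
--     return False
-- ===== SOURCE B (Python) =====
-- _NON_CODE_DIRS = frozenset({
--     ".git",
--     ".trellis/tasks",
--     ".trellis/workspace",
--     ".trellis/.runtime",
-- })
--
-- def _normalize_rel_path(path: str) -> str:
--     normalized = path.replace("\\", "/")
--     while normalized.startswith("./"):
--         normalized = normalized[2:]
--     return normalized.strip("/")
--
-- def _is_non_code_path(path: str) -> bool:
--     # Walk the path's segment-prefixes and test each against one prebuilt table,
--     # instead of scanning per-prefix with startswith.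
--     segments = _normalize_rel_path(path).split("/")
--     return any(
--         "/".join(segments[:i]) in _NON_CODE_DIRS
--         for i in range(1, len(segments) + 1)
--     )
-- ===== Notes on version B (the rewrite author's own statement) =====
-- stated objective: alternative
-- what changed: Inverts the traversal: instead of scanning a tuple of prefixes and testing each with ==/startswith, B splits the normalized path into segments once and checks each segment-prefix join against a single prebuilt frozenset of non-code directories.
import Mathlib
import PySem

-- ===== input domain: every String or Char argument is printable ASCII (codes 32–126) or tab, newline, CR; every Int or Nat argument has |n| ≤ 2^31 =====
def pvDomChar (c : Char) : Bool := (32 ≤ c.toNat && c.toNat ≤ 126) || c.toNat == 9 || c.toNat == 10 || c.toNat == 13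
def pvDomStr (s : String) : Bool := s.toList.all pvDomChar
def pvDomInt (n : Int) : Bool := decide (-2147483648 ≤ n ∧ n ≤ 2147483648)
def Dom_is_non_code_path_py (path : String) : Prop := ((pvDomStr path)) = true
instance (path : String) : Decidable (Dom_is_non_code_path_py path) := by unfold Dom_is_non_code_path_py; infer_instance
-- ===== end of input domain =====

-- B checks each segment-prefix of the path against one prebuilt set of non-code
-- directories instead of scanning a tuple of prefixes with ==/startswith
-- (alternative decomposition, same cost class).

-- shared helper: _normalize_rel_path (identical in Source A and Source B);
-- 'normalized[2:]' on a list is List.drop 2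
def pvDropDotSlash (s : List Char) : List Char :=
  if _h : PySem.Chars.startswith s ['.', '/'] = true then pvDropDotSlash (s.drop 2) else s
termination_by s.length
decreasing_by
  simp only [PySem.Chars.startswith, List.isPrefixOf_iff_prefix] at _h
  have := _h.length_le
  simp only [List.length_drop, List.length_cons, List.length_nil] at *
  omega

def pvNormalize (s : List Char) : List Char :=
  PySem.Chars.stripChars (pvDropDotSlash (PySem.Chars.replace s ['\\'] ['/'])) ['/']

-- ===== PORT A =====
def pvNonCodePrefixes : List (List Char) :=
  [".trellis/tasks".toList, ".trellis/workspace".toList, ".trellis/.runtime".toList]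

def is_non_code_path_py (path : String) : Bool :=
  let normalized := pvNormalize path.toList
  if normalized == ".git".toList || PySem.Chars.startswith normalized ".git/".toList then
    true
  else
    -- for-loop with early 'return True' over the prefix tuple
    pvNonCodePrefixes.any (fun pre =>
      normalized == pre || PySem.Chars.startswith normalized (pre ++ ['/']))

-- ===== PORT B =====
-- the frozenset _NON_CODE_DIRS (four distinct members)
def pvNonCodeDirs : PySem.Set (List Char) :=
  PySem.Set.ofList
    [".git".toList, ".trellis/tasks".toList, ".trellis/workspace".toList, ".trellis/.runtime".toList]

def is_non_code_path_py_alt (path : String) : Bool :=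
  let segments := PySem.Chars.splitOn (pvNormalize path.toList) ['/']
  (PySem.List.pyRange 1 ((segments.length : Int) + 1) 1).any (fun i =>
    PySem.Set.contains pvNonCodeDirs
      (PySem.Chars.join ['/'] (PySem.List.slice segments none (some i))))

-- ===== PRECONDITION & SPEC =====
def Spec_is_non_code_path_py (path : String) (out : Bool) : Prop := out = is_non_code_path_py_alt path
instance (path : String) (out : Bool) : Decidable (Spec_is_non_code_path_py path out) := by unfold Spec_is_non_code_path_py; infer_instance

-- ===== CLAIM (what is proved, stated in full; the proofs are below) =====
def Claim_equal_is_non_code_path_py : Prop := ∀ (path : String), Dom_is_non_code_path_py path → Spec_is_non_code_path_py path (is_non_code_path_py path)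

-- ===== LEMMAS AND PROOFS =====

theorem pv_modifyHead_fun_id (l : List (List Char)) : List.modifyHead (fun x => x) l = l := by
  cases l <;> rfl

-- PySem's fueled split with a single-character separator is Mathlib's List.splitOn
theorem pv_go_single (c : Char) (fuel : Nat) :
    ∀ (l cur : List Char) (_ : l.length ≤ fuel) (acc' : List (List Char)),
      PySem.Chars.splitOn.go [c] fuel l cur acc' =
        acc'.reverse ++ (List.splitOn c l).modifyHead (cur.reverse ++ ·) := by
  induction fuel with
  | zero =>
    intro l cur hl acc'
    have : l = [] := List.eq_nil_of_length_eq_zero (Nat.le_zero.mp hl)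
    subst this
    simp [PySem.Chars.splitOn.go, List.splitOn]
  | succ n ih =>
    intro l cur hl acc'
    cases l with
    | nil => simp [PySem.Chars.splitOn.go, List.splitOn]
    | cons x xs =>
      rw [PySem.Chars.splitOn.go]
      by_cases hx : x = c
      · subst hx
        have hpre : [x].isPrefixOf (x :: xs) = true := by simp [List.isPrefixOf]
        rw [if_pos hpre]
        simp only [List.length_singleton, List.drop_one, List.tail_cons]
        rw [ih xs [] (by simpa using Nat.le_of_succ_le_succ hl)]
        simp [List.splitOn, pv_modifyHead_fun_id]
      · have hpre : [c].isPrefixOf (x :: xs) = false := by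
          simp [List.isPrefixOf]; exact fun h => absurd h.symm hx
        rw [if_neg (by simp [hpre])]
        rw [ih xs (x :: cur) (by simpa using Nat.le_of_succ_le_succ hl)]
        simp only [List.splitOn, List.splitOnP_cons]
        rw [if_neg (by simp [hx])]
        cases h : List.splitOnP (fun y => y == c) xs <;> simp

theorem pv_splitOn_single (c : Char) (s : List Char) :
    PySem.Chars.splitOn s [c] = List.splitOn c s := by
  rw [PySem.Chars.splitOn, pv_go_single c (s.length + 1) s [] (by omega) []]
  simp [pv_modifyHead_fun_id]

theorem pv_splitOn_append_sep (c : Char) (a b : List Char) :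
    List.splitOn c (a ++ c :: b) = List.splitOn c a ++ List.splitOn c b := by
  simp only [List.splitOn]
  exact List.splitOnP_append_cons _ a b c (by simp)

theorem pv_intercalate_append_ne (c : Char) (A B : List (List Char)) (hA : A ≠ []) (hB : B ≠ []) :
    [c].intercalate (A ++ B) = [c].intercalate A ++ c :: [c].intercalate B := by
  induction A with
  | nil => exact absurd rfl hA
  | cons hd tl ih =>
    cases tl with
    | nil =>
      cases B with
      | nil => exact absurd rfl hB
      | cons b bt => simp [List.intercalate]
    | cons h2 t2 =>
      have := ih (by simp)
      simp only [List.intercalate] at this ⊢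
      simp only [List.cons_append, List.intersperse_cons₂, List.flatten_cons] at this ⊢
      simp [this]

-- the heart: ==/startswith against one prefix ↔ some segment-prefix join equals it
theorem pv_bridge (c : Char) (P : List (List Char)) (s : List Char)
    (hP : P ≠ []) (hc : ∀ q ∈ P, c ∉ q) :
    (s = [c].intercalate P ∨ [c].intercalate P ++ [c] <+: s) ↔
      ∃ i : Nat, 1 ≤ i ∧ i ≤ (List.splitOn c s).length ∧
        [c].intercalate ((List.splitOn c s).take i) = [c].intercalate P := by
  constructor
  · rintro (rfl | ⟨t, ht⟩)
    · have hsp : List.splitOn c ([c].intercalate P) = P := List.splitOn_intercalate P c hc hP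
      exact ⟨P.length, by simpa [Nat.one_le_iff_ne_zero] using hP,
        by rw [hsp], by rw [hsp, List.take_length]⟩
    · have hs : s = [c].intercalate P ++ c :: t := by simpa using ht.symm
      subst hs
      rw [pv_splitOn_append_sep, List.splitOn_intercalate P c hc hP]
      refine ⟨P.length, by simpa [Nat.one_le_iff_ne_zero] using hP, by simp, ?_⟩
      simp [List.take_left']
  · rintro ⟨i, h1, h2, h3⟩
    rcases eq_or_lt_of_le h2 with heq | hlt
    · left
      conv_lhs => rw [← List.intercalate_splitOn s c]
      rw [← h3, heq, List.take_length]
    · right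
      have hdec : s = [c].intercalate ((List.splitOn c s).take i) ++ c ::
          [c].intercalate ((List.splitOn c s).drop i) := by
        conv_lhs => rw [← List.intercalate_splitOn s c]
        conv_lhs => rw [← List.take_append_drop i (List.splitOn c s)]
        exact pv_intercalate_append_ne c _ _
          (by rw [← List.length_pos_iff, List.length_take]; omega)
          (by rw [← List.length_pos_iff, List.length_drop]; omega)
      refine ⟨[c].intercalate ((List.splitOn c s).drop i), ?_⟩
      rw [← h3]
      simpa using hdec.symm

theorem pv_dirs : (pvNonCodeDirs : List (List Char)) =
    [".git".toList, ".trellis/tasks".toList, ".trellis/workspace".toList, ".trellis/.runtime".toList] := by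
  decide

-- the two match strategies agree on any (normalized) character list
theorem pv_main (m : List Char) :
    (if m == ".git".toList || PySem.Chars.startswith m ".git/".toList then true
     else pvNonCodePrefixes.any fun pre =>
       m == pre || PySem.Chars.startswith m (pre ++ ['/'])) =
    ((PySem.List.pyRange 1 (((PySem.Chars.splitOn m ['/']).length : Int) + 1) 1).any fun i =>
      PySem.Set.contains pvNonCodeDirs
        (PySem.Chars.join ['/'] (PySem.List.slice (PySem.Chars.splitOn m ['/']) none (some i)))) := by
  rw [Bool.eq_iff_iff]
  rw [pv_splitOn_single]
  set segs := List.splitOn '/' m with hsegs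
  -- LHS as a disjunction of the four ==/startswith tests
  have hL : (if m == ".git".toList || PySem.Chars.startswith m ".git/".toList then true
     else pvNonCodePrefixes.any fun pre =>
       m == pre || PySem.Chars.startswith m (pre ++ ['/'])) = true ↔
      ((m = ".git".toList ∨ ".git".toList ++ ['/'] <+: m) ∨
       (m = ".trellis/tasks".toList ∨ ".trellis/tasks".toList ++ ['/'] <+: m) ∨
       (m = ".trellis/workspace".toList ∨ ".trellis/workspace".toList ++ ['/'] <+: m) ∨
       (m = ".trellis/.runtime".toList ∨ ".trellis/.runtime".toList ++ ['/'] <+: m)) := by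
    have e1 : ".git".toList ++ ['/'] = ".git/".toList := rfl
    split_ifs with h
    · simp only [true_iff]
      left
      rcases (Bool.or_eq_true _ _).mp h with h' | h'
      · exact Or.inl (by simpa using h')
      · exact Or.inr (e1 ▸ (PySem.Chars.startswith_iff _ _).mp h')
    · rw [Bool.or_eq_true, beq_iff_eq] at h
      push Not at h
      simp only [pvNonCodePrefixes, List.any_cons, List.any_nil, Bool.or_false,
        Bool.or_eq_true, beq_iff_eq, PySem.Chars.startswith_iff]
      constructor
      · rintro (h' | h' | h')
        · exact Or.inr (Or.inl h')
        · exact Or.inr (Or.inr (Or.inl h'))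
        · exact Or.inr (Or.inr (Or.inr h'))
      · rintro ((h' | h') | h' | h' | h')
        · exact absurd h' h.1
        · exact absurd ((PySem.Chars.startswith_iff _ _).mpr (e1 ▸ h')) h.2
        · exact Or.inl h'
        · exact Or.inr (Or.inl h')
        · exact Or.inr (Or.inr h')
  rw [hL]
  -- RHS as an existential over Nat-indexed segment prefixes
  have hR : ((PySem.List.pyRange 1 ((segs.length : Int) + 1) 1).any fun i =>
      PySem.Set.contains pvNonCodeDirs
        (PySem.Chars.join ['/'] (PySem.List.slice segs none (some i)))) = true ↔
      ∃ j : Nat, 1 ≤ j ∧ j ≤ segs.length ∧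
        (['/'].intercalate (segs.take j) = ".git".toList ∨
         ['/'].intercalate (segs.take j) = ".trellis/tasks".toList ∨
         ['/'].intercalate (segs.take j) = ".trellis/workspace".toList ∨
         ['/'].intercalate (segs.take j) = ".trellis/.runtime".toList) := by
    rw [List.any_eq_true]
    constructor
    · rintro ⟨i, hi, hp⟩
      rw [PySem.List.mem_pyRange_one] at hi
      refine ⟨i.toNat, by omega, by omega, ?_⟩
      rw [PySem.List.slice_to segs (by omega)] at hp
      simpa [PySem.Set.contains, pv_dirs, PySem.Chars.join] using hp
    · rintro ⟨j, h1, h2, hp⟩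
      refine ⟨(j : Int), PySem.List.mem_pyRange_one.mpr ⟨by omega, by omega⟩, ?_⟩
      rw [PySem.List.slice_to segs (by omega)]
      simpa [PySem.Set.contains, pv_dirs, PySem.Chars.join] using hp
  rw [hR]
  -- bridge each prefix
  have b1 := pv_bridge '/' [".git".toList] m (by simp) (by decide)
  have b2 := pv_bridge '/' [".trellis".toList, "tasks".toList] m (by simp) (by decide)
  have b3 := pv_bridge '/' [".trellis".toList, "workspace".toList] m (by simp) (by decide)
  have b4 := pv_bridge '/' [".trellis".toList, ".runtime".toList] m (by simp) (by decide)
  rw [show ['/'].intercalate [".git".toList] = ".git".toList from rfl] at b1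
  rw [show ['/'].intercalate [".trellis".toList, "tasks".toList] = ".trellis/tasks".toList from rfl] at b2
  rw [show ['/'].intercalate [".trellis".toList, "workspace".toList] = ".trellis/workspace".toList from rfl] at b3
  rw [show ['/'].intercalate [".trellis".toList, ".runtime".toList] = ".trellis/.runtime".toList from rfl] at b4
  rw [b1, b2, b3, b4, ← hsegs]
  constructor
  · rintro (⟨j, h1, h2, h3⟩ | ⟨j, h1, h2, h3⟩ | ⟨j, h1, h2, h3⟩ | ⟨j, h1, h2, h3⟩)
    · exact ⟨j, h1, h2, Or.inl h3⟩
    · exact ⟨j, h1, h2, Or.inr (Or.inl h3)⟩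
    · exact ⟨j, h1, h2, Or.inr (Or.inr (Or.inl h3))⟩
    · exact ⟨j, h1, h2, Or.inr (Or.inr (Or.inr h3))⟩
  · rintro ⟨j, h1, h2, h3 | h3 | h3 | h3⟩
    · exact Or.inl ⟨j, h1, h2, h3⟩
    · exact Or.inr (Or.inl ⟨j, h1, h2, h3⟩)
    · exact Or.inr (Or.inr (Or.inl ⟨j, h1, h2, h3⟩))
    · exact Or.inr (Or.inr (Or.inr ⟨j, h1, h2, h3⟩))

-- ===== VERDICT (by name: the statement is the Claim_ definition above) =====
theorem is_non_code_path_py_spec : Claim_equal_is_non_code_path_py := by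
  intro path _
  unfold Spec_is_non_code_path_py is_non_code_path_py is_non_code_path_py_alt
  exact pv_main (pvNormalize path.toList)
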